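-- pv_equiv track=rewrite | github.com/patriciacahn/DihedralLinkingInvariants | dihedrallinking.py | createarrowlists
-- ===== SOURCE A (Python) =====
-- def reflect(i,j,p):
--     s=(2*j-i)%p
--     return s
--
-- def createarrowlists(myp,mycolorlist,myoverstrands):
--     n=len(mycolorlist)
--     myq=int((myp+1)/2) %myp
--     vertices=[]
--     v=mycolorlist[0]
--     for i in range(myq):
--         vertices.append(v)
--         v=(v+1)%myp
--
--     myinitiallist=[]
--     for i  in vertices:
--         myinitiallist.append([reflect(i,mycolorlist[0],myp),i])
--     myarrowlists=[]
--     myarrowlists.append(myinitiallist)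
--     for i in range(n-1):
--         newlist=[]
--         for j in range(myq):
--             newlist.append([reflect(myarrowlists[i][j][0],mycolorlist[myoverstrands[i]],myp),reflect(myarrowlists[i][j][1],mycolorlist[myoverstrands[i]],myp)])
--         myarrowlists.append(newlist)
--     return  myarrowlists
-- ===== SOURCE B (Python) =====
-- def createarrowlists(myp, mycolorlist, myoverstrands):
--     n = len(mycolorlist)
--     myq = int((myp + 1) / 2) % myp
--     c0 = mycolorlist[0]
--     initial = []
--     v = c0
--     for _ in range(myq):
--         initial.append([(2 * c0 - v) % myp, v])
--         v = (v + 1) % myp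
--     if not initial:
--         # nothing to transform: every arrow list is empty
--         return [[] for _ in range(n)]
--     # one pass over the steps: accumulate the composed reflection as an
--     # affine map x -> (s*x + t) % myp, storing the map for each later list
--     maps = []
--     s, t = 1, 0
--     for i in range(n - 1):
--         c = mycolorlist[myoverstrands[i]]
--         s, t = -s, (2 * c - t) % myp
--         maps.append((s, t))
--     return [initial] + [[[(s * a + t) % myp, (s * b + t) % myp] for a, b in initial]
--                         for (s, t) in maps]
-- ===== Notes on version B (the rewrite author's own statement) =====
-- stated objective: alternative
-- what changed: Instead of producing each arrow list by reflecting every entry of the previous list, B makes one pass over the n-1 steps composing the reflections into affine maps (sign, shift) mod p and applies each precomputed map directly to the initial list; when the initial list is empty it returns the n empty lists directly.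
import Mathlib
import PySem

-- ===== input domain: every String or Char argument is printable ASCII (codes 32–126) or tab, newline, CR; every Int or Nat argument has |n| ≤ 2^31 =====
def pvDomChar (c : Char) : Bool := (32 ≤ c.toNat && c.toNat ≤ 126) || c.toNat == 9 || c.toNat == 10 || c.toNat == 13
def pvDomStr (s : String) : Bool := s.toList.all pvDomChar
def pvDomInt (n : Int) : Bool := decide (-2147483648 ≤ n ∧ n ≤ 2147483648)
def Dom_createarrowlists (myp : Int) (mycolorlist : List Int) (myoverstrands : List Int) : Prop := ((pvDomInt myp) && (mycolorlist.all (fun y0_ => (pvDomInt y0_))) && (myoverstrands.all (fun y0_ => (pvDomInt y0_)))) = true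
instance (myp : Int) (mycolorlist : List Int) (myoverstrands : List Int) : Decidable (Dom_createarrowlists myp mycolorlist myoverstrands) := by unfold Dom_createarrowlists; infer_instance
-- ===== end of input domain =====

-- B replaces A's chained row-by-row reflection with one pass that composes the per-step
-- reflections into affine maps (s, t) applied directly to the initial row, returning the
-- n empty lists outright when that row is empty (objective: alternative decomposition).


-- ===== PORT A =====
-- helper reflect(i, j, p)
def pvReflect (i j p : Int) : Int := PySem.Int.mod (2 * j - i) p

-- 'for i in range(myq): vertices.append(v); v=(v+1)%myp' (loop variable unused;
-- append-in-loop as the obvious structural recursion producing elements in order)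
def pvVertLoop (p : Int) : Nat → Int → List Int
  | 0, _ => []
  | k + 1, v => v :: pvVertLoop p k (PySem.Int.mod (v + 1) p)

-- 'for i in vertices: myinitiallist.append([reflect(i, mycolorlist[0], myp), i])'
def pvInitLoop (p c0 : Int) : List Int → List (List Int)
  | [] => []
  | i :: rest => [pvReflect i c0 p, i] :: pvInitLoop p c0 rest

-- inner 'for j in range(myq)' loop over the previous row
def pvInnerLoop (p c : Int) (row : List (List Int)) : Nat → Nat → List (List Int)
  | 0, _ => []
  | k + 1, j =>
      let e := PySem.List.pyGetD row (j : Int) []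
      [pvReflect (PySem.List.pyGetD e 0 0) c p, pvReflect (PySem.List.pyGetD e 1 0) c p]
        :: pvInnerLoop p c row k (j + 1)

-- outer 'for i in range(n-1)' loop; myarrowlists[i] via pyGetD (Pre_ keeps all Python lookups in range)
def pvMainLoop (p : Int) (cl ov : List Int) (q : Int) : Nat → Nat → List (List (List Int)) → List (List (List Int))
  | 0, _, rows => rows
  | k + 1, i, rows =>
      let c := PySem.List.pyGetD cl (PySem.List.pyGetD ov (i : Int) 0) 0
      let row := PySem.List.pyGetD rows (i : Int) []
      let newlist := pvInnerLoop p c row q.toNat 0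
      pvMainLoop p cl ov q k (i + 1) (rows ++ [newlist])

def createarrowlists (myp : Int) (mycolorlist : List Int) (myoverstrands : List Int) : List (List (List Int)) :=
  let n : Int := PySem.List.len mycolorlist
  -- int((myp+1)/2): float true division then int(); truncdiv is exact here since |myp| ≤ 2^31 < 2^53
  let myq : Int := PySem.Int.mod (PySem.Int.truncdiv (myp + 1) 2) myp
  let v0 : Int := PySem.List.pyGetD mycolorlist 0 0
  let vertices := pvVertLoop myp myq.toNat v0
  let myinitiallist := pvInitLoop myp v0 vertices
  pvMainLoop myp mycolorlist myoverstrands myq (n - 1).toNat 0 [myinitiallist]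

-- ===== PORT B =====
-- B builds the initial row in one loop: initial.append([(2*c0-v)%p, v]); v=(v+1)%p
def pvAltInitLoop (p c0 : Int) : Nat → Int → List (List Int)
  | 0, _ => []
  | k + 1, v =>
      [PySem.Int.mod (2 * c0 - v) p, v] :: pvAltInitLoop p c0 k (PySem.Int.mod (v + 1) p)

-- one pass over the steps accumulating the composed affine map (s, t)
def pvMapsLoop (p : Int) (cl ov : List Int) : Nat → Nat → Int → Int → List (Int × Int)
  | 0, _, _, _ => []
  | k + 1, i, s, t =>
      let c := PySem.List.pyGetD cl (PySem.List.pyGetD ov (i : Int) 0) 0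
      let s' := -s
      let t' := PySem.Int.mod (2 * c - t) p
      (s', t') :: pvMapsLoop p cl ov k (i + 1) s' t'

-- '[(s*a+t)%p, (s*b+t)%p] for a, b in initial' (entries are 2-lists; unpacking = components 0 and 1)
def pvApplyMap (p s t : Int) (init : List (List Int)) : List (List Int) :=
  init.map (fun e => [PySem.Int.mod (s * PySem.List.pyGetD e 0 0 + t) p,
                      PySem.Int.mod (s * PySem.List.pyGetD e 1 0 + t) p])

def createarrowlists_alt (myp : Int) (mycolorlist : List Int) (myoverstrands : List Int) : List (List (List Int)) :=
  let n : Int := PySem.List.len mycolorlist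
  let myq : Int := PySem.Int.mod (PySem.Int.truncdiv (myp + 1) 2) myp
  let c0 : Int := PySem.List.pyGetD mycolorlist 0 0
  let init := pvAltInitLoop myp c0 myq.toNat c0
  -- 'if not initial: return [[] for _ in range(n)]'
  if init = [] then List.replicate n.toNat []
  else
    let maps := pvMapsLoop myp mycolorlist myoverstrands (n - 1).toNat 0 1 0
    init :: maps.map (fun st => pvApplyMap myp st.1 st.2 init)

-- ===== PRECONDITION & SPEC =====
-- Pre_ excludes exactly the inputs on which A raises: myp = 0 (ZeroDivisionError at % myp),
-- empty mycolorlist (IndexError at mycolorlist[0]), and — only when myq > 0, so A's inner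
-- loop actually performs the lookups — out-of-range myoverstrands[i] or overstrand values
-- that are invalid indices into mycolorlist (IndexError).
def Pre_createarrowlists (myp : Int) (mycolorlist : List Int) (myoverstrands : List Int) : Prop :=
  myp ≠ 0 ∧ mycolorlist ≠ [] ∧
  (0 < PySem.Int.mod (PySem.Int.truncdiv (myp + 1) 2) myp →
     mycolorlist.length - 1 ≤ myoverstrands.length ∧
     ∀ c ∈ myoverstrands.take (mycolorlist.length - 1),
       -(mycolorlist.length : Int) ≤ c ∧ c < (mycolorlist.length : Int))
instance (myp : Int) (mycolorlist : List Int) (myoverstrands : List Int) : Decidable (Pre_createarrowlists myp mycolorlist myoverstrands) := by unfold Pre_createarrowlists; infer_instance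

def pvWitness_createarrowlists : Int × List Int × List Int := (5, [1, 2, 3], [1, 0])

def Spec_createarrowlists (myp : Int) (mycolorlist : List Int) (myoverstrands : List Int) (out : List (List (List Int))) : Prop := out = createarrowlists_alt myp mycolorlist myoverstrands
instance (myp : Int) (mycolorlist : List Int) (myoverstrands : List Int) (out : List (List (List Int))) : Decidable (Spec_createarrowlists myp mycolorlist myoverstrands out) := by unfold Spec_createarrowlists; infer_instance

-- ===== CLAIM (what is proved, stated in full; the proofs are below) =====
def Claim_equal_createarrowlists : Prop := ∀ (myp : Int) (mycolorlist : List Int) (myoverstrands : List Int), Dom_createarrowlists myp mycolorlist myoverstrands → Pre_createarrowlists myp mycolorlist myoverstrands → Spec_createarrowlists myp mycolorlist myoverstrands (createarrowlists myp mycolorlist myoverstrands)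

-- ===== LEMMAS AND PROOFS =====

-- fmod congruence: adding/subtracting an already-reduced term reduces the same
theorem pv_fmod_add (a b p : Int) :
    PySem.Int.mod (a + PySem.Int.mod b p) p = PySem.Int.mod (a + b) p := by
  unfold PySem.Int.mod
  have h : a + Int.fmod b p = (a + b) + p * (-(Int.fdiv b p)) := by
    rw [Int.fmod_def]; ring
  rw [h, Int.add_mul_fmod_self_left]

theorem pv_fmod_sub (a b p : Int) :
    PySem.Int.mod (a - PySem.Int.mod b p) p = PySem.Int.mod (a - b) p := by
  unfold PySem.Int.mod
  have h : a - Int.fmod b p = (a - b) + p * Int.fdiv b p := by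
    rw [Int.fmod_def]; ring
  rw [h, Int.add_mul_fmod_self_left]

-- spec-side abstractions
def pvStepRow (p c : Int) (row : List (List Int)) : List (List Int) :=
  row.map (fun e => [pvReflect (PySem.List.pyGetD e 0 0) c p, pvReflect (PySem.List.pyGetD e 1 0) c p])

def pvColor (cl ov : List Int) (i : Nat) : Int :=
  PySem.List.pyGetD cl (PySem.List.pyGetD ov (i : Int) 0) 0

def pvColors (cl ov : List Int) (i k : Nat) : List Int :=
  (List.range k).map (fun m => pvColor cl ov (i + m))

def pvScan (p : Int) : List Int → List (List Int) → List (List (List Int))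
  | [], row => [row]
  | c :: cs, row => row :: pvScan p cs (pvStepRow p c row)

def pvMapsSpec (p : Int) : List Int → Int → Int → List (Int × Int)
  | [], _, _ => []
  | c :: cs, s, t =>
      (-s, PySem.Int.mod (2 * c - t) p) :: pvMapsSpec p cs (-s) (PySem.Int.mod (2 * c - t) p)

theorem pv_vertLoop_length (p : Int) : ∀ (k : Nat) (v : Int), (pvVertLoop p k v).length = k := by
  intro k
  induction k with
  | zero => intro v; simp [pvVertLoop]
  | succ k ih => intro v; simp [pvVertLoop, ih]

theorem pv_initLoop_eq (p c0 : Int) : ∀ (xs : List Int),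
    pvInitLoop p c0 xs = xs.map (fun i => [PySem.Int.mod (2 * c0 - i) p, i]) := by
  intro xs
  induction xs with
  | nil => simp [pvInitLoop]
  | cons x rest ih => simp [pvInitLoop, ih, pvReflect]

theorem pv_altInitLoop_eq (p c0 : Int) : ∀ (k : Nat) (v : Int),
    pvAltInitLoop p c0 k v
      = (pvVertLoop p k v).map (fun i => [PySem.Int.mod (2 * c0 - i) p, i]) := by
  intro k
  induction k with
  | zero => intro v; simp [pvAltInitLoop, pvVertLoop]
  | succ k ih => intro v; simp [pvAltInitLoop, pvVertLoop, ih]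

theorem pv_innerLoop_eq (p c : Int) (row : List (List Int)) : ∀ (k j : Nat),
    j + k = row.length →
    pvInnerLoop p c row k j
      = (row.drop j).map
          (fun e => [pvReflect (PySem.List.pyGetD e 0 0) c p, pvReflect (PySem.List.pyGetD e 1 0) c p]) := by
  intro k
  induction k with
  | zero =>
      intro j h
      have : row.drop j = [] := List.drop_eq_nil_of_le (by omega)
      simp [pvInnerLoop, this]
  | succ k ih =>
      intro j h
      have hj : j < row.length := by omega
      have hget : PySem.List.pyGetD row (j : Int) [] = row[j] := by
        simp [PySem.List.pyGetD_natCast, List.getD, List.getElem?_eq_getElem hj]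
      have hdrop : row.drop j = row[j] :: row.drop (j + 1) := List.drop_eq_getElem_cons hj
      simp only [pvInnerLoop, hget]
      rw [ih (j + 1) (by omega), hdrop, List.map_cons]

theorem pv_innerLoop_stepRow (p c : Int) (row : List (List Int)) :
    pvInnerLoop p c row row.length 0 = pvStepRow p c row := by
  rw [pv_innerLoop_eq p c row row.length 0 (by omega)]
  simp [pvStepRow]

theorem pv_colors_cons (cl ov : List Int) (i k : Nat) :
    pvColors cl ov i (k + 1) = pvColor cl ov i :: pvColors cl ov (i + 1) k := by
  unfold pvColors
  rw [List.range_succ_eq_map, List.map_cons, List.map_map]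
  congr 1
  apply List.map_congr_left
  intro m _
  simp only [Function.comp_apply]
  congr 1
  omega

theorem pv_mainLoop_eq (p : Int) (cl ov : List Int) (q : Int) :
    ∀ (k i : Nat) (pre : List (List (List Int))) (last : List (List Int)),
    pre.length = i → last.length = q.toNat →
    pvMainLoop p cl ov q k i (pre ++ [last]) = pre ++ pvScan p (pvColors cl ov i k) last := by
  intro k
  induction k with
  | zero =>
      intro i pre last hpre hlen
      simp [pvMainLoop, pvColors, pvScan]
  | succ k ih =>
      intro i pre last hpre hlen
      have hget : PySem.List.pyGetD (pre ++ [last]) (i : Int) [] = last := by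
        simp [PySem.List.pyGetD_natCast, ← hpre]
      have hinner : pvInnerLoop p (pvColor cl ov i) last q.toNat 0 = pvStepRow p (pvColor cl ov i) last := by
        rw [← hlen]; exact pv_innerLoop_stepRow _ _ _
      simp only [pvMainLoop, hget]
      show pvMainLoop p cl ov q k (i + 1)
        ((pre ++ [last]) ++ [pvInnerLoop p (pvColor cl ov i) last q.toNat 0]) = _
      rw [hinner]
      rw [ih (i + 1) (pre ++ [last]) (pvStepRow p (pvColor cl ov i) last)
          (by simp [hpre]) (by simp [pvStepRow, hlen])]
      rw [pv_colors_cons]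
      simp [pvScan]

theorem pv_mapsLoop_eq (p : Int) (cl ov : List Int) :
    ∀ (k i : Nat) (s t : Int),
    pvMapsLoop p cl ov k i s t = pvMapsSpec p (pvColors cl ov i k) s t := by
  intro k
  induction k with
  | zero => intro i s t; simp [pvMapsLoop, pvColors, pvMapsSpec]
  | succ k ih =>
      intro i s t
      simp only [pvMapsLoop]
      rw [ih, pv_colors_cons]
      simp [pvMapsSpec, pvColor]

-- one reflection step on an affinely-mapped row is the composed affine map
theorem pv_stepRow_applyMap (p c s t : Int) (X : List (List Int)) :
    pvStepRow p c (pvApplyMap p s t X)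
      = pvApplyMap p (-s) (PySem.Int.mod (2 * c - t) p) X := by
  simp only [pvStepRow, pvApplyMap, List.map_map]
  apply List.map_congr_left
  intro e _
  simp only [Function.comp, pvReflect]
  rw [PySem.List.pyGetD_zero_cons]
  have h1 : PySem.List.pyGetD
      ([PySem.Int.mod (s * PySem.List.pyGetD e 0 0 + t) p,
        PySem.Int.mod (s * PySem.List.pyGetD e 1 0 + t) p] : List Int) 1 0
      = PySem.Int.mod (s * PySem.List.pyGetD e 1 0 + t) p := by
    simp [pysem]
  rw [h1]
  congr 1
  · rw [pv_fmod_sub, pv_fmod_add (-s * PySem.List.pyGetD e 0 0) (2 * c - t) p]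
    congr 1; ring
  · congr 1
    rw [pv_fmod_sub, pv_fmod_add (-s * PySem.List.pyGetD e 1 0) (2 * c - t) p]
    congr 1; ring

-- the first reflection step is itself an affine map of the raw initial row
theorem pv_stepRow_init (p c : Int) (X : List (List Int)) :
    pvStepRow p c X = pvApplyMap p (-1) (PySem.Int.mod (2 * c - 0) p) X := by
  simp only [pvStepRow, pvApplyMap]
  apply List.map_congr_left
  intro e _
  simp only [pvReflect]
  congr 1
  · rw [pv_fmod_add (-1 * PySem.List.pyGetD e 0 0) (2 * c - 0) p]
    congr 1; ring
  · congr 1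
    rw [pv_fmod_add (-1 * PySem.List.pyGetD e 1 0) (2 * c - 0) p]
    congr 1; ring

theorem pv_scan_applyMap (p : Int) : ∀ (cs : List Int) (s t : Int) (X : List (List Int)),
    pvScan p cs (pvApplyMap p s t X)
      = pvApplyMap p s t X :: (pvMapsSpec p cs s t).map (fun st => pvApplyMap p st.1 st.2 X) := by
  intro cs
  induction cs with
  | nil => intro s t X; simp [pvScan, pvMapsSpec]
  | cons c rest ih =>
      intro s t X
      simp only [pvScan, pvMapsSpec, List.map_cons]
      rw [pv_stepRow_applyMap, ih]

theorem pv_scan_raw (p : Int) (cs : List Int) (X : List (List Int)) :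
    pvScan p cs X = X :: (pvMapsSpec p cs 1 0).map (fun st => pvApplyMap p st.1 st.2 X) := by
  cases cs with
  | nil => simp [pvScan, pvMapsSpec]
  | cons c rest =>
      simp only [pvScan, pvMapsSpec, List.map_cons]
      rw [pv_stepRow_init, pv_scan_applyMap]

-- scanning from the empty row only ever produces empty rows
theorem pv_scan_nil (p : Int) : ∀ (cs : List Int),
    pvScan p cs [] = List.replicate (cs.length + 1) [] := by
  intro cs
  induction cs with
  | nil => simp [pvScan]
  | cons c rest ih => simp [pvScan, pvStepRow, ih, List.replicate_succ]

-- ===== VERDICT (by name: the statement is the Claim_ definition above) =====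
theorem createarrowlists_spec : Claim_equal_createarrowlists := by
  intro myp cl ov _ hpre
  unfold Spec_createarrowlists createarrowlists createarrowlists_alt
  simp only []
  rw [pv_initLoop_eq, pv_altInitLoop_eq, pv_mapsLoop_eq]
  set q : Int := PySem.Int.mod (PySem.Int.truncdiv (myp + 1) 2) myp with hq
  set c0 : Int := PySem.List.pyGetD cl 0 0 with hc0
  set init : List (List Int) :=
    (pvVertLoop myp q.toNat c0).map (fun i => [PySem.Int.mod (2 * c0 - i) myp, i]) with hinit
  have hlen : init.length = q.toNat := by
    simp [hinit, pv_vertLoop_length]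
  have hmain := pv_mainLoop_eq myp cl ov q ((PySem.List.len cl - 1)).toNat 0 [] init rfl hlen
  simp only [List.nil_append] at hmain
  rw [hmain]
  by_cases hnil : init = []
  · rw [hnil, if_pos rfl, pv_scan_nil]
    have hcl : cl ≠ [] := hpre.2.1
    have hlcl : 1 ≤ cl.length := List.length_pos_of_ne_nil hcl
    have hcount : ((pvColors cl ov 0 (PySem.List.len cl - 1).toNat).length + 1)
        = (PySem.List.len cl).toNat := by
      simp only [pvColors, List.length_map, List.length_range, PySem.List.len]
      omega
    rw [hcount]
  · rw [if_neg hnil, pv_scan_raw]
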